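-- pv_equiv track=rewrite | github.com/bperret/NashvilleNumbers | backend/core/nashville_converter.py | calculate_scale_degree
-- ===== SOURCE A (Python) =====
-- from typing import Optional, Tuple
--
-- CHROMATIC = ['C', 'C#', 'D', 'D#', 'E', 'F', 'F#', 'G', 'G#', 'A', 'A#', 'B']
--
-- FLAT_TO_SHARP = {
--     'Db': 'C#', 'Eb': 'D#', 'Gb': 'F#', 'Ab': 'G#', 'Bb': 'A#',
--     'Cb': 'B', 'Fb': 'E', 'E#': 'F', 'B#': 'C'
-- }
--
-- MAJOR_SCALE_INTERVALS = [0, 2, 4, 5, 7, 9, 11]  # 1, 2, 3, 4, 5, 6, 7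
--
-- MINOR_SCALE_INTERVALS = [0, 2, 3, 5, 7, 8, 10]  # 1, 2, b3, 4, 5, b6, b7
--
-- def normalize_note(note: str) -> str:
--     """
--     Normalize a note to sharp notation for consistent chromatic calculations.
--
--     Args:
--         note: Note name (e.g., "C", "Db", "F#")
--
--     Returns:
--         Normalized note name using sharps
--
--     Examples:
--         >>> normalize_note("Db")
--         'C#'
--         >>> normalize_note("F#")
--         'F#'
--     """
--     return FLAT_TO_SHARP.get(note, note)
--
-- def get_chromatic_index(note: str) -> int:
--     """
--     Get the chromatic index (0-11) of a note.
--
--     Args: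
--         note: Note name
--
--     Returns:
--         Index in chromatic scale (0-11)
--
--     Examples:
--         >>> get_chromatic_index("C")
--         0
--         >>> get_chromatic_index("F#")
--         6
--     """
--     normalized = normalize_note(note)
--     if normalized not in CHROMATIC:
--         raise ValueError(f"Invalid note: {note}")
--     return CHROMATIC.index(normalized)
--
-- def calculate_scale_degree(root: str, key: str, mode: str = "major") -> Tuple[int, bool]:
--     """
--     Calculate the scale degree of a chord root relative to a key.
--
--     Args:
--         root: Chord root note (e.g., "D")
--         key: Key of the song (e.g., "C")
--         mode: "major" or "minor"
--
--     Returns: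
--         Tuple of (scale_degree, is_chromatic)
--         - scale_degree: 1-7 for diatonic, adjusted for chromatics
--         - is_chromatic: True if the chord is outside the key (accidental)
--
--     Examples:
--         >>> calculate_scale_degree("D", "C", "major")
--         (2, False)  # D is the 2nd degree in C major
--         >>> calculate_scale_degree("Eb", "C", "major")
--         (3, True)   # Eb is chromatic (b3) in C major
--     """
--     root_index = get_chromatic_index(root)
--     key_index = get_chromatic_index(key)
--
--     # Calculate semitone distance from key
--     semitone_distance = (root_index - key_index) % 12
--
--     # Select scale intervals based on mode
--     scale_intervals = MAJOR_SCALE_INTERVALS if mode == "major" else MINOR_SCALE_INTERVALS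
--
--     # Check if this semitone distance matches a diatonic scale degree
--     if semitone_distance in scale_intervals:
--         scale_degree = scale_intervals.index(semitone_distance) + 1
--         return (scale_degree, False)
--
--     # If not diatonic, find the closest scale degree
--     # This handles chromatic chords like bII, #IV, bVII, etc.
--     closest_degree = 1
--     min_distance = 12
--
--     for degree_idx, interval in enumerate(scale_intervals):
--         distance = abs(semitone_distance - interval)
--         if distance < min_distance:
--             min_distance = distance
--             closest_degree = degree_idx + 1
--
--     return (closest_degree, True)
-- ===== SOURCE B (Python) =====
-- _NOTE_INDEX = {
--     'C': 0, 'C#': 1, 'D': 2, 'D#': 3, 'E': 4, 'F': 5, 'F#': 6,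
--     'G': 7, 'G#': 8, 'A': 9, 'A#': 10, 'B': 11,
--     'Db': 1, 'Eb': 3, 'Gb': 6, 'Ab': 8, 'Bb': 10,
--     'Cb': 11, 'Fb': 4, 'E#': 5, 'B#': 0,
-- }
--
-- # Precomputed (scale_degree, is_chromatic) for each semitone distance 0..11,
-- # closest-interval rule with strict-< tie-breaking to the lowest degree.
-- _MAJOR_TABLE = [(1, False), (1, True), (2, False), (2, True), (3, False), (4, False),
--                 (4, True), (5, False), (5, True), (6, False), (6, True), (7, False)]
-- _MINOR_TABLE = [(1, False), (1, True), (2, False), (3, False), (3, True), (4, False),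
--                 (4, True), (5, False), (6, False), (6, True), (7, False), (7, True)]
--
-- def calculate_scale_degree(root, key, mode="major"):
--     if root not in _NOTE_INDEX:
--         raise ValueError(f"Invalid note: {root}")
--     if key not in _NOTE_INDEX:
--         raise ValueError(f"Invalid note: {key}")
--     table = _MAJOR_TABLE if mode == "major" else _MINOR_TABLE
--     return table[(_NOTE_INDEX[root] - _NOTE_INDEX[key]) % 12]
-- ===== Notes on version B (the rewrite author's own statement) =====
-- stated objective: simpler
-- what changed: Replaces the per-call membership test plus closest-interval scan with a single precomputed 12-entry (degree, is_chromatic) table per mode and one note-to-index dict, so each call is a pure O(1) lookup.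
import Mathlib
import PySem

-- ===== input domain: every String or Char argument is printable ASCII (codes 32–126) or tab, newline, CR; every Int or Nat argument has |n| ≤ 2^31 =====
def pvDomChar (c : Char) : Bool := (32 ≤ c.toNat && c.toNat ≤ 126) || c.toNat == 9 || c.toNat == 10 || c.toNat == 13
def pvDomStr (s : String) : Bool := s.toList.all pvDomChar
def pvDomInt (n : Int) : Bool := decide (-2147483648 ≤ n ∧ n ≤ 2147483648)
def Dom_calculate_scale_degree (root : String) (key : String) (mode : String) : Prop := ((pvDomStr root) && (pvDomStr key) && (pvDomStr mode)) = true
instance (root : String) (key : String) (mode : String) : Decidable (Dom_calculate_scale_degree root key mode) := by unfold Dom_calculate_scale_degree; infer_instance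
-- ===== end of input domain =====

-- B replaces A's membership test + closest-interval scan by a precomputed 12-entry
-- (degree, is_chromatic) table per mode and a note→index dict: one O(1) lookup per call.

-- ===== PORT A =====
def pyCHROMATIC : List String := ["C","C#","D","D#","E","F","F#","G","G#","A","A#","B"]
def pyFLAT_TO_SHARP : PySem.Dict String String := PySem.Dict.ofList
  [("Db","C#"),("Eb","D#"),("Gb","F#"),("Ab","G#"),("Bb","A#"),("Cb","B"),("Fb","E"),("E#","F"),("B#","C")]
def pyMAJOR_SCALE_INTERVALS : List Int := [0,2,4,5,7,9,11]
def pyMINOR_SCALE_INTERVALS : List Int := [0,2,3,5,7,8,10]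

def normalize_note (note : String) : String := PySem.Dict.getD pyFLAT_TO_SHARP note note

-- none = the ValueError branch ('raise ValueError(...)')
def get_chromatic_index? (note : String) : Option Int :=
  let normalized := normalize_note note
  if normalized ∈ pyCHROMATIC then (PySem.List.index? pyCHROMATIC normalized).map (Int.ofNat ·) else none

def calculate_scale_degree (root : String) (key : String) (mode : String) : Int × Bool :=
  match get_chromatic_index? root, get_chromatic_index? key with
  | some root_index, some key_index =>
    let semitone_distance := PySem.Int.mod (root_index - key_index) 12
    let scale_intervals := if mode = "major" then pyMAJOR_SCALE_INTERVALS else pyMINOR_SCALE_INTERVALS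
    if semitone_distance ∈ scale_intervals then
      (((PySem.List.index? scale_intervals semitone_distance).getD 0 : Nat) + 1, false)
    else
      let st := (PySem.List.enumerate scale_intervals).foldl
        (fun (st : Int × Int) p =>
          let distance := |semitone_distance - p.2|
          if distance < st.2 then (p.1 + 1, distance) else st) (1, 12)
      (st.1, true)
  | _, _ => (0, false)  -- unreachable under Pre_ (A raises ValueError)

-- ===== PORT B =====
def noteIndex : PySem.Dict String Int := PySem.Dict.ofList
  [("C",0),("C#",1),("D",2),("D#",3),("E",4),("F",5),("F#",6),("G",7),("G#",8),("A",9),("A#",10),("B",11),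
   ("Db",1),("Eb",3),("Gb",6),("Ab",8),("Bb",10),("Cb",11),("Fb",4),("E#",5),("B#",0)]
def tableMajor : List (Int × Bool) :=
  [(1,false),(1,true),(2,false),(2,true),(3,false),(4,false),(4,true),(5,false),(5,true),(6,false),(6,true),(7,false)]
def tableMinor : List (Int × Bool) :=
  [(1,false),(1,true),(2,false),(3,false),(3,true),(4,false),(4,true),(5,false),(6,false),(6,true),(7,false),(7,true)]

def calculate_scale_degree_alt (root : String) (key : String) (mode : String) : Int × Bool :=
  if !PySem.Dict.contains noteIndex root then (0, false)  -- unreachable under Pre_ (B raises ValueError)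
  else if !PySem.Dict.contains noteIndex key then (0, false)  -- unreachable under Pre_ (B raises ValueError)
  else
    let table := if mode = "major" then tableMajor else tableMinor
    (PySem.List.pyGet? table (PySem.Int.mod (PySem.Dict.getD noteIndex root 0 - PySem.Dict.getD noteIndex key 0) 12)).getD (0, false)  -- index always in 0..11

-- ===== PRECONDITION & SPEC =====
-- Pre_ excludes exactly the inputs where A (and B) raise ValueError: root or key not a recognised note name.
def pvValidNotes : List String :=
  ["C","C#","D","D#","E","F","F#","G","G#","A","A#","B","Db","Eb","Gb","Ab","Bb","Cb","Fb","E#","B#"]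
def Pre_calculate_scale_degree (root : String) (key : String) (mode : String) : Prop :=
  root ∈ pvValidNotes ∧ key ∈ pvValidNotes
instance (root : String) (key : String) (mode : String) : Decidable (Pre_calculate_scale_degree root key mode) := by unfold Pre_calculate_scale_degree; infer_instance
def pvWitness_calculate_scale_degree : String × String × String := ("D", "C", "major")

def Spec_calculate_scale_degree (root : String) (key : String) (mode : String) (out : Int × Bool) : Prop := out = calculate_scale_degree_alt root key mode
instance (root : String) (key : String) (mode : String) (out : Int × Bool) : Decidable (Spec_calculate_scale_degree root key mode out) := by unfold Spec_calculate_scale_degree; infer_instance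

-- ===== CLAIM (what is proved, stated in full; the proofs are below) =====
def Claim_equal_calculate_scale_degree : Prop := ∀ (root : String) (key : String) (mode : String), Dom_calculate_scale_degree root key mode → Pre_calculate_scale_degree root key mode → Spec_calculate_scale_degree root key mode (calculate_scale_degree root key mode)

-- ===== LEMMAS AND PROOFS =====

lemma eq_major : ∀ r ∈ pvValidNotes, ∀ k ∈ pvValidNotes,
    calculate_scale_degree r k "major" = calculate_scale_degree_alt r k "major" := by decide

lemma eq_minor : ∀ r ∈ pvValidNotes, ∀ k ∈ pvValidNotes,
    calculate_scale_degree r k "minor" = calculate_scale_degree_alt r k "minor" := by decide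

lemma A_mode_ne (root key mode : String) (h : ¬ mode = "major") :
    calculate_scale_degree root key mode = calculate_scale_degree root key "minor" := by
  unfold calculate_scale_degree
  cases get_chromatic_index? root <;> cases get_chromatic_index? key <;> simp [h]

lemma B_mode_ne (root key mode : String) (h : ¬ mode = "major") :
    calculate_scale_degree_alt root key mode = calculate_scale_degree_alt root key "minor" := by
  unfold calculate_scale_degree_alt
  simp only [h, if_false]
  split <;> [rfl; skip]
  split <;> [rfl; rfl]

-- ===== VERDICT (by name: the statement is the Claim_ definition above) =====
theorem calculate_scale_degree_spec : Claim_equal_calculate_scale_degree := by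
  intro root key mode _ hpre
  obtain ⟨hr, hk⟩ := hpre
  unfold Spec_calculate_scale_degree
  by_cases hm : mode = "major"
  · subst hm; exact eq_major root hr key hk
  · rw [A_mode_ne root key mode hm, B_mode_ne root key mode hm]
    exact eq_minor root hr key hk
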